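-- pv_equiv track=rewrite | github.com/piyush-kgp/DSAlgoPractice | codechef/codechef_practice-master/ZCO12001_sol2.py | brace_tracker
-- ===== SOURCE A (Python) =====
-- def brace_tracker(arr):
--     i=0
--     braces = 0
--     tracker=[]
--     while i<len(arr):
--         if arr[i]==1:
--             braces+=1
--         elif arr[i]==2:
--             braces-=1
--         tracker.append(braces)
--         i+=1
--     return tracker
-- ===== SOURCE B (Python) =====
-- def brace_tracker(arr):
--     # Divide and conquer: the depth profile of a concatenation is the left
--     # half's profile followed by the right half's profile shifted by the
--     # left half's final depth (prefix sums compose under concatenation).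
--     if not arr:
--         return []
--     if len(arr) == 1:
--         x = arr[0]
--         return [1 if x == 1 else (-1 if x == 2 else 0)]
--     m = len(arr) // 2
--     left = brace_tracker(arr[:m])
--     right = brace_tracker(arr[m:])
--     off = left[-1]
--     return left + [off + v for v in right]
-- ===== Notes on version B (the rewrite author's own statement) =====
-- stated objective: alternative
-- what changed: Replaced the single left-to-right index loop with a running counter by a recursive divide-and-conquer: compute the depth profile of each half independently and shift the right half's profile by the left half's final depth, using that prefix sums compose under concatenation.
import Mathlib
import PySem

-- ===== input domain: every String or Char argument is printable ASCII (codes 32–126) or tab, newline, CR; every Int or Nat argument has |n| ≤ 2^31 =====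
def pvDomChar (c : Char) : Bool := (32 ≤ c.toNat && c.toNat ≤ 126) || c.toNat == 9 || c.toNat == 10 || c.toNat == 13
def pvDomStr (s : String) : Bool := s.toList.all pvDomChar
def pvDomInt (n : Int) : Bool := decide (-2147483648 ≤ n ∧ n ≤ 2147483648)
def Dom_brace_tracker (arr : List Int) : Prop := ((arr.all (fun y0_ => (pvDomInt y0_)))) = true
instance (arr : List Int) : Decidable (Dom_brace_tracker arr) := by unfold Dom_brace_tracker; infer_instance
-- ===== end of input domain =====

-- B replaces A's single index loop with a recursive divide-and-conquer that merges half profiles by an offset shift; objective: alternative algorithm (no speed claim).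


-- ===== PORT A =====
-- the while loop over indices, with the running `braces` counter and appends, as structural recursion over the list
def braceLoopA : List Int → Int → List Int
  | [], _ => []
  | x :: xs, braces =>
      let braces' := if x = 1 then braces + 1 else if x = 2 then braces - 1 else braces
      braces' :: braceLoopA xs braces'

def brace_tracker (arr : List Int) : List Int := braceLoopA arr 0

-- ===== PORT B =====
-- the single-element profile: 1 → [1], 2 → [-1], otherwise [0]
def braceDelta (x : Int) : Int := if x = 1 then 1 else if x = 2 then (-1) else 0

-- Source B's recursion: split at the midpoint, recurse on both halves, shift the right
-- profile by the left profile's last element (left[-1]; the left half is nonempty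
-- here, so getLastD 0 is exactly Python's left[-1])
def braceDC (arr : List Int) : List Int :=
  match arr with
  | [] => []
  | [x] => [braceDelta x]
  | a :: b :: rest =>
      let l := a :: b :: rest
      let m := l.length / 2
      let left := braceDC (l.take m)
      let right := braceDC (l.drop m)
      let off := left.getLastD 0
      left ++ right.map (fun v => off + v)
termination_by arr.length
decreasing_by
  · simp; omega
  · simp; omega

def brace_tracker_alt (arr : List Int) : List Int := braceDC arr

-- ===== PRECONDITION & SPEC =====
def Spec_brace_tracker (arr : List Int) (out : List Int) : Prop := out = brace_tracker_alt arr
instance (arr : List Int) (out : List Int) : Decidable (Spec_brace_tracker arr out) := by unfold Spec_brace_tracker; infer_instance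

-- ===== CLAIM (what is proved, stated in full; the proofs are below) =====
def Claim_equal_brace_tracker : Prop := ∀ (arr : List Int), Dom_brace_tracker arr → Spec_brace_tracker arr (brace_tracker arr)

-- ===== LEMMAS AND PROOFS =====
-- shifting the start value shifts every entry of A's loop output
theorem braceLoopA_shift (xs : List Int) (b c : Int) :
    braceLoopA xs (b + c) = (braceLoopA xs b).map (fun v => c + v) := by
  induction xs generalizing b with
  | nil => rfl
  | cons x xs ih =>
    simp only [braceLoopA]
    have h : (if x = 1 then b + c + 1 else if x = 2 then b + c - 1 else b + c)
        = (if x = 1 then b + 1 else if x = 2 then b - 1 else b) + c := by split_ifs <;> ring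
    rw [h, ih]
    simp [add_comm]

-- A's loop over a concatenation splits, the right part starting at the left output's last value
theorem braceLoopA_append (xs ys : List Int) (b : Int) :
    braceLoopA (xs ++ ys) b = braceLoopA xs b ++ braceLoopA ys ((braceLoopA xs b).getLastD b) := by
  induction xs generalizing b with
  | nil => rfl
  | cons x xs ih =>
    simp only [List.cons_append, braceLoopA]
    rw [ih]
    congr 1
    simp only [List.getLastD_cons]

theorem braceDC_eq_loop (arr : List Int) : braceDC arr = braceLoopA arr 0 := by
  induction arr using braceDC.induct with
  | case1 => simp [braceDC, braceLoopA]
  | case2 x => simp [braceDC, braceLoopA, braceDelta]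
  | case3 a b rest _ _ ihl ihr =>
    rw [braceDC]
    rw [ihl, ihr]
    have hsplit := braceLoopA_append ((a :: b :: rest).take ((a :: b :: rest).length / 2))
        ((a :: b :: rest).drop ((a :: b :: rest).length / 2)) 0
    rw [List.take_append_drop] at hsplit
    rw [hsplit]
    congr 1
    have := braceLoopA_shift ((a :: b :: rest).drop ((a :: b :: rest).length / 2)) 0
        ((braceLoopA ((a :: b :: rest).take ((a :: b :: rest).length / 2)) 0).getLastD 0)
    simp only [zero_add] at this
    rw [← this]

-- ===== VERDICT (by name: the statement is the Claim_ definition above) =====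
theorem brace_tracker_spec : Claim_equal_brace_tracker := by
  intro arr _
  unfold Spec_brace_tracker brace_tracker brace_tracker_alt
  exact (braceDC_eq_loop arr).symm
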